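-- pv_equiv track=rewrite | github.com/CSC-101/lab-5-camilleabetong | lab5.py | largest_between
-- ===== SOURCE A (Python) =====
-- def largest_between(nums, lower, upper):
--     if lower > upper:
--         return None
--     if lower < 0:
--         lower = 0
--     if upper >= len(nums):
--         upper = len(nums) - 1
--     if lower > upper:
--         return None
--     max_index = lower
--     for i in range(lower, upper + 1):
--         if nums[i] > nums[max_index]:
--             max_index = i
--     return max_index
-- ===== SOURCE B (Python) =====
-- def _argmax(nums, lo, hi):
--     # first index of the maximum of nums[lo..hi], by divide and conquer
--     if lo == hi:
--         return lo
--     mid = (lo + hi) // 2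
--     l = _argmax(nums, lo, mid)
--     r = _argmax(nums, mid + 1, hi)
--     return l if nums[l] >= nums[r] else r
--
-- def largest_between(nums, lower, upper):
--     if lower > upper:
--         return None
--     lower = max(lower, 0)
--     upper = min(upper, len(nums) - 1)
--     if lower > upper:
--         return None
--     return _argmax(nums, lower, upper)
-- ===== Notes on version B (the rewrite author's own statement) =====
-- stated objective: alternative
-- what changed: Replaces A's single left-to-right index-tracking scan by a divide-and-conquer recursion that splits the window in half, takes the argmax of each half, and combines them preferring the left half on ties (which preserves first-occurrence semantics).
import Mathlib
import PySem

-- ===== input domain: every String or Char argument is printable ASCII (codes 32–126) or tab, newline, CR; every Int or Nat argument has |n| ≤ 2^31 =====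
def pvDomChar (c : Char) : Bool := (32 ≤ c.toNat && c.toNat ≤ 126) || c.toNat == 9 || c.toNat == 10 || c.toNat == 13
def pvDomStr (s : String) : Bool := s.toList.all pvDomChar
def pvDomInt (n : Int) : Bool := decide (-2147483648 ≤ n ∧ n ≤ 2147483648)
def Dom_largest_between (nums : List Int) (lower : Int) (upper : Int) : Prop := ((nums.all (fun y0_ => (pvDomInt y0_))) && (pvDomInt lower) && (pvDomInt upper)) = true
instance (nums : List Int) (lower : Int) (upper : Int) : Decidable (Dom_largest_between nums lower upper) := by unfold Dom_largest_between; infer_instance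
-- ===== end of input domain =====

-- B replaces A's single left-to-right index-tracking scan by a divide-and-conquer
-- recursion (split the window, argmax of each half, prefer the left half on ties);
-- objective: alternative, same cost.

-- ===== PORT A =====
-- nums[i] is ported with pyGetD: every index the loop visits lies in [0, len) after the clamps, so the default is never used.
def largest_between (nums : List Int) (lower : Int) (upper : Int) : Option Int :=
  if lower > upper then none
  else
    let lower := if lower < 0 then 0 else lower
    let upper := if upper ≥ (nums.length : Int) then (nums.length : Int) - 1 else upper
    if lower > upper then none
    else
      some ((PySem.List.pyRange lower (upper + 1) 1).foldl
        (fun max_index i =>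
          if PySem.List.pyGetD nums i 0 > PySem.List.pyGetD nums max_index 0 then i else max_index)
        lower)

-- ===== PORT B =====
-- _argmax: Python's 'if lo == hi' base case is rendered as 'hi ≤ lo' (equivalent on
-- every call B makes, which all satisfy lo ≤ hi) so the recursion is total.
def argmaxDC (nums : List Int) (lo hi : Int) : Int :=
  if _h : hi ≤ lo then lo
  else
    let mid := PySem.Int.floordiv (lo + hi) 2
    let l := argmaxDC nums lo mid
    let r := argmaxDC nums (mid + 1) hi
    if PySem.List.pyGetD nums l 0 ≥ PySem.List.pyGetD nums r 0 then l else r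
termination_by (hi - lo).toNat
decreasing_by
  all_goals
    simp only [PySem.Int.floordiv_eq_ediv_of_pos (by norm_num : (0:Int) < 2)] at *
    omega

def largest_between_alt (nums : List Int) (lower : Int) (upper : Int) : Option Int :=
  if lower > upper then none
  else
    let lower := max lower 0
    let upper := min upper ((nums.length : Int) - 1)
    if lower > upper then none
    else some (argmaxDC nums lower upper)

-- ===== PRECONDITION & SPEC =====
def Spec_largest_between (nums : List Int) (lower : Int) (upper : Int) (out : Option Int) : Prop := out = largest_between_alt nums lower upper
instance (nums : List Int) (lower : Int) (upper : Int) (out : Option Int) : Decidable (Spec_largest_between nums lower upper out) := by unfold Spec_largest_between; infer_instance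

-- ===== CLAIM =====
def Claim_equal_largest_between : Prop := ∀ (nums : List Int) (lower : Int) (upper : Int), Dom_largest_between nums lower upper → Spec_largest_between nums lower upper (largest_between nums lower upper)

-- ===== LEMMAS AND PROOFS =====

-- Invariant of A's loop: scanning a, a+1, …, a+n-1 from `a`, the result r is in range,
-- g-maximal on the scanned window, and strictly greater than everything before it.
theorem loopA_inv (g : Int → Int) (a : Int) :
    ∀ (n : ℕ),
      let r := (PySem.List.pyRange a (a + n) 1).foldl
        (fun mi i => if g i > g mi then i else mi) a
      a ≤ r ∧ r < a + n + 1 ∧ (1 ≤ n → r < a + n) ∧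
      (∀ i, a ≤ i → i < a + n → g i ≤ g r) ∧
      (∀ i, a ≤ i → i < r → g i < g r) := by
  intro n
  induction n with
  | zero =>
    simp only [Nat.cast_zero, add_zero]
    have : PySem.List.pyRange a a 1 = [] := by simp [PySem.List.pyRange]
    rw [this]
    simp only [List.foldl_nil]
    refine ⟨le_refl a, by omega, by omega, ?_, ?_⟩ <;> intro i h1 h2 <;> omega
  | succ n ih =>
    obtain ⟨h1, h2, h3, h4, h5⟩ := ih
    have hcast : a + ((n : ℕ) + 1 : ℕ) = (a + n) + 1 := by push_cast; ring
    rw [hcast, PySem.List.pyRange_one_succ_right (by omega), List.foldl_append]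
    set r := (PySem.List.pyRange a (a + n) 1).foldl (fun mi i => if g i > g mi then i else mi) a with hr
    simp only [List.foldl_cons, List.foldl_nil]
    by_cases hc : g (a + n) > g r
    · simp only [if_pos hc]
      refine ⟨by omega, by omega, by omega, ?_, ?_⟩
      · intro i hi1 hi2
        rcases lt_or_ge i (a + n) with h | h
        · exact le_of_lt (lt_of_le_of_lt (h4 i hi1 h) hc)
        · have : i = a + n := by omega
          simp [this]
      · intro i hi1 hi2
        exact lt_of_le_of_lt (h4 i hi1 hi2) hc
    · simp only [if_neg hc]
      refine ⟨h1, by omega, by omega, ?_, h5⟩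
      intro i hi1 hi2
      rcases lt_or_ge i (a + n) with h | h
      · exact h4 i hi1 h
      · have : i = a + n := by omega
        rw [this]; omega

-- Invariant of B's recursion: on a window lo ≤ hi the result is the FIRST argmax of [lo, hi].
theorem argmaxDC_inv (nums : List Int) :
    ∀ (k : ℕ) (lo hi : Int), (hi - lo).toNat = k → lo ≤ hi →
      lo ≤ argmaxDC nums lo hi ∧ argmaxDC nums lo hi ≤ hi ∧
      (∀ i, lo ≤ i → i ≤ hi →
        PySem.List.pyGetD nums i 0 ≤ PySem.List.pyGetD nums (argmaxDC nums lo hi) 0) ∧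
      (∀ i, lo ≤ i → i < argmaxDC nums lo hi →
        PySem.List.pyGetD nums i 0 < PySem.List.pyGetD nums (argmaxDC nums lo hi) 0) := by
  intro k
  induction k using Nat.strong_induction_on with
  | _ k ih =>
    intro lo hi hk hle
    by_cases h : hi ≤ lo
    · have heq : lo = hi := le_antisymm hle h
      rw [argmaxDC, dif_pos h]
      subst heq
      refine ⟨le_refl _, le_refl _, ?_, ?_⟩ <;> intro i h1 h2
      · have : i = lo := le_antisymm h2 h1
        simp [this]
      · omega
    · have hlt : lo < hi := lt_of_not_ge h
      have hmid : lo ≤ PySem.Int.floordiv (lo + hi) 2 ∧ PySem.Int.floordiv (lo + hi) 2 < hi := by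
        rw [PySem.Int.floordiv_eq_ediv_of_pos (by norm_num : (0:Int) < 2)]
        omega
      set mid := PySem.Int.floordiv (lo + hi) 2 with hmiddef
      obtain ⟨l1, l2, l3, l4⟩ := ih (mid - lo).toNat (by omega) lo mid rfl hmid.1
      obtain ⟨r1, r2, r3, r4⟩ := ih (hi - (mid + 1)).toNat (by omega) (mid + 1) hi rfl (by omega)
      rw [argmaxDC, dif_neg h, ← hmiddef]
      by_cases hc : PySem.List.pyGetD nums (argmaxDC nums lo mid) 0 ≥
          PySem.List.pyGetD nums (argmaxDC nums (mid + 1) hi) 0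
      · rw [if_pos hc]
        refine ⟨l1, by omega, ?_, ?_⟩
        · intro i h1 h2
          rcases le_or_gt i mid with hcase | hcase
          · exact l3 i h1 hcase
          · exact le_trans (r3 i (by omega) h2) hc
        · intro i h1 h2
          exact l4 i h1 h2
      · rw [if_neg hc]
        rw [not_le] at hc
        refine ⟨by omega, r2, ?_, ?_⟩
        · intro i h1 h2
          rcases le_or_gt i mid with hcase | hcase
          · exact le_of_lt (lt_of_le_of_lt (l3 i h1 hcase) hc)
          · exact r3 i (by omega) h2
        · intro i h1 h2
          rcases le_or_gt i mid with hcase | hcase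
          · exact lt_of_le_of_lt (l3 i h1 hcase) hc
          · exact r4 i (by omega) h2

theorem largest_between_spec_aux : ∀ (nums : List Int) (lower : Int) (upper : Int),
    largest_between nums lower upper = largest_between_alt nums lower upper := by
  intro nums lower upper
  unfold largest_between largest_between_alt
  by_cases h0 : lower > upper
  · simp [h0]
  simp only [if_neg h0]
  have hl : (if lower < 0 then 0 else lower) = max lower 0 := by omega
  have hu : (if upper ≥ (nums.length : Int) then (nums.length : Int) - 1 else upper)
      = min upper ((nums.length : Int) - 1) := by omega
  rw [hl, hu]
  set a := max lower 0 with ha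
  set b := min upper ((nums.length : Int) - 1) with hb
  by_cases h1 : a > b
  · simp [h1]
  simp only [if_neg h1]
  have hab : a ≤ b := le_of_not_gt h1
  set n := (b + 1 - a).toNat with hn
  have hbn : b + 1 = a + (n : Int) := by omega
  have hn1 : 1 ≤ n := by omega
  obtain ⟨p1, p2, p3, p4, p5⟩ := loopA_inv (fun i => PySem.List.pyGetD nums i 0) a n
  set rA := (PySem.List.pyRange a (a + n) 1).foldl
    (fun mi i => if PySem.List.pyGetD nums i 0 > PySem.List.pyGetD nums mi 0 then i else mi) a with hrA
  have p3' := p3 hn1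
  obtain ⟨q1, q2, q3, q4⟩ := argmaxDC_inv nums (b - a).toNat a b rfl hab
  set rB := argmaxDC nums a b with hrB
  rw [hbn]
  congr 1
  -- uniqueness of the first argmax
  have hAB : PySem.List.pyGetD nums rA 0 ≤ PySem.List.pyGetD nums rB 0 := q3 rA p1 (by omega)
  have hBA : PySem.List.pyGetD nums rB 0 ≤ PySem.List.pyGetD nums rA 0 := p4 rB q1 (by omega)
  rcases lt_trichotomy rA rB with h | h | h
  · have := q4 rA p1 h; omega
  · exact h
  · have := p5 rB q1 h; omega

-- ===== VERDICT =====
theorem largest_between_spec : Claim_equal_largest_between := by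
  intro nums lower upper _
  unfold Spec_largest_between
  exact largest_between_spec_aux nums lower upper
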